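-- pv_equiv track=rewrite | github.com/tiffsoa/a08_2022 | a2/elevation.py | compare_elevations_within_row
-- ===== SOURCE A (Python) =====
-- def compare_elevations_within_row(elevation_map: list[list[int]], map_row: int,
--                                   level: int) -> list[int]:
--     """Return a new list containing the three counts: the number of
--     elevations from row number map_row of elevation map elevation_map
--     that are less than, equal to, and greater than elevation level.
--
--     Precondition: elevation_map is a valid elevation map.
--                   0 <= map_row < len(elevation_map).
--
--     >>> compare_elevations_within_row(THREE_BY_THREE, 1, 5)
--     [1, 1, 1]
--     >>> compare_elevations_within_row(FOUR_BY_FOUR, 1, 2)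
--     [0, 1, 3]
--
--     """
--     sublist = []
--     smaller = 0
--     equal = 0
--     bigger = 0
--     sublist.extend(elevation_map[map_row])
--     for item in sublist:
--         if item < level:
--             smaller += 1
--         elif item > level:
--             bigger += 1
--         else:
--             equal += 1
--     return [smaller, equal, bigger]
-- ===== SOURCE B (Python) =====
-- def compare_elevations_within_row(elevation_map: list[list[int]], map_row: int,
--                                   level: int) -> list[int]:
--     row = elevation_map[map_row]
--     smaller = sum(1 for x in row if x < level)
--     equal = row.count(level)
--     bigger = len(row) - smaller - equal
--     return [smaller, equal, bigger]
-- ===== Notes on version B (the rewrite author's own statement) =====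
-- stated objective: simpler
-- what changed: Replaces the three-way if/elif/else counting loop with branch-free counts: a comprehension sum for smaller, row.count(level) for equal, and bigger derived arithmetically as len(row) - smaller - equal.
import Mathlib
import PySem

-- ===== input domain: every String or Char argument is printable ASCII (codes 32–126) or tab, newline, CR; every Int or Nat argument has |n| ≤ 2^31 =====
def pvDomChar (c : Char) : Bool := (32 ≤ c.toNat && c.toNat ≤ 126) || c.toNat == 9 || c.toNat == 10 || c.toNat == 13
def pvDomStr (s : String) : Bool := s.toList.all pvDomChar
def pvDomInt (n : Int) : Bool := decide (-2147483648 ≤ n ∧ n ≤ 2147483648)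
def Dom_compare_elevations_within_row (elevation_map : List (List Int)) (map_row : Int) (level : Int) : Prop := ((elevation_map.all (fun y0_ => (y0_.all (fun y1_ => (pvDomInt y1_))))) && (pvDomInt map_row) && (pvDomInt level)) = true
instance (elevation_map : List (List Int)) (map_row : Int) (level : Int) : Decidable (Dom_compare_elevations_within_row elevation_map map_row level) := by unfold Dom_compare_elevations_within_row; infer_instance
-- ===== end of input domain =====

-- B replaces A's three-way if/elif/else counting loop with branch-free counts (countP / count) and derives the third count by subtraction from the row length (objective: simpler).


-- ===== PORT A =====
def compare_elevations_within_row (elevation_map : List (List Int)) (map_row : Int) (level : Int) : List Int :=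
  let sublist : List Int := ([] : List Int) ++ PySem.List.pyGetD elevation_map map_row []
  let acc := sublist.foldl
    (fun (acc : Int × Int × Int) item =>
      if item < level then (acc.1 + 1, acc.2.1, acc.2.2)
      else if item > level then (acc.1, acc.2.1, acc.2.2 + 1)
      else (acc.1, acc.2.1 + 1, acc.2.2))
    (0, 0, 0)
  [acc.1, acc.2.1, acc.2.2]

-- ===== PORT B =====
def compare_elevations_within_row_alt (elevation_map : List (List Int)) (map_row : Int) (level : Int) : List Int :=
  let row := PySem.List.pyGetD elevation_map map_row []
  let smaller : Int := (row.countP (fun x => x < level) : Nat)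
  let equal : Int := PySem.List.count row level
  let bigger : Int := (row.length : Int) - smaller - equal
  [smaller, equal, bigger]

-- ===== PRECONDITION & SPEC =====
-- Pre_ excludes exactly the inputs where Python's elevation_map[map_row] raises IndexError.
def Pre_compare_elevations_within_row (elevation_map : List (List Int)) (map_row : Int) (level : Int) : Prop :=
  PySem.Raise.InRange elevation_map.length map_row
instance (elevation_map : List (List Int)) (map_row : Int) (level : Int) : Decidable (Pre_compare_elevations_within_row elevation_map map_row level) := by unfold Pre_compare_elevations_within_row; infer_instance
def pvWitness_compare_elevations_within_row : List (List Int) × Int × Int := ([[1, 5, 9]], 0, 5)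

def Spec_compare_elevations_within_row (elevation_map : List (List Int)) (map_row : Int) (level : Int) (out : List Int) : Prop := out = compare_elevations_within_row_alt elevation_map map_row level
instance (elevation_map : List (List Int)) (map_row : Int) (level : Int) (out : List Int) : Decidable (Spec_compare_elevations_within_row elevation_map map_row level out) := by unfold Spec_compare_elevations_within_row; infer_instance

-- ===== CLAIM (what is proved, stated in full; the proofs are below) =====
def Claim_equal_compare_elevations_within_row : Prop := ∀ (elevation_map : List (List Int)) (map_row : Int) (level : Int), Dom_compare_elevations_within_row elevation_map map_row level → Pre_compare_elevations_within_row elevation_map map_row level → Spec_compare_elevations_within_row elevation_map map_row level (compare_elevations_within_row elevation_map map_row level)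

-- ===== LEMMAS AND PROOFS =====

-- A's fold, with the accumulator generalized: each component grows by the matching count.
theorem pv_foldA (level : Int) (row : List Int) (s e b : Int) :
    row.foldl
      (fun (acc : Int × Int × Int) item =>
        if item < level then (acc.1 + 1, acc.2.1, acc.2.2)
        else if item > level then (acc.1, acc.2.1, acc.2.2 + 1)
        else (acc.1, acc.2.1 + 1, acc.2.2))
      (s, e, b)
    = (s + (row.countP (fun x => x < level) : Nat),
       e + (row.count level : Nat),
       b + (row.countP (fun x => level < x) : Nat)) := by
  induction row generalizing s e b with
  | nil => simp
  | cons x xs ih =>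
    simp only [List.foldl_cons, List.countP_cons, List.count_cons]
    by_cases h1 : x < level
    · have hne : x ≠ level := by omega
      have h3 : ¬ level < x := by omega
      simp [h1, hne, h3, ih]
      omega
    · by_cases h2 : level < x
      · have hne : x ≠ level := by omega
        simp [h1, h2, hne, ih]
        omega
      · have hx : x = level := by omega
        simp [hx, ih]
        omega

theorem pv_count_partition (level : Int) (row : List Int) :
    row.countP (fun x => x < level) + row.count level + row.countP (fun x => level < x) = row.length := by
  induction row with
  | nil => simp
  | cons x xs ih =>
    simp only [List.countP_cons, List.count_cons, List.length_cons]
    by_cases h1 : x < level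
    · have hne : x ≠ level := by omega
      have h3 : ¬ level < x := by omega
      simp [h1, hne, h3]; omega
    · by_cases h2 : level < x
      · have hne : x ≠ level := by omega
        simp [h1, h2, hne]; omega
      · have hx : x = level := by omega
        simp [hx]; omega

-- ===== VERDICT (by name: the statement is the Claim_ definition above) =====
theorem compare_elevations_within_row_spec : Claim_equal_compare_elevations_within_row := by
  intro em r l _ _
  unfold Spec_compare_elevations_within_row compare_elevations_within_row compare_elevations_within_row_alt
  simp only [List.nil_append, pv_foldA, PySem.List.count_eq, zero_add]
  have := pv_count_partition l (PySem.List.pyGetD em r [])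
  simp only [List.cons.injEq, and_true]
  exact ⟨trivial, trivial, by omega⟩
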